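-- pv_equiv track=rewrite | github.com/miliar/Code_Jam_Webscraper | Solutions_python/Problem_210/37.py | solve
-- ===== SOURCE A (Python) =====
-- def solve(edges, time_J, time_C):
--     swaps = 0
--
--     # fill edges['j'] with time_J:
--     edges_J = []
--     for e in edges['j']:
--         if time_J > 0:
--             take_this = min(time_J, e)
--             time_J -= take_this
--             e -= take_this
--         if e > 0:
--             edges_J.append(e)
--     edges['j'] = edges_J
--
--
--     edges_C = []
--     for e in edges['c']:
--         if time_C > 0:
--             take_this = min(time_C, e)
--             time_C -= take_this
--             e -= take_this
--         if e > 0: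
--             edges_C.append(e)
--     edges['c'] = edges_C
--     swaps = len(edges['cj']) + 2 * len(edges['c']) + 2 * len(edges['j'])
--     return swaps
-- ===== SOURCE B (Python) =====
-- def _consume(lst, t):
--     # locate the cutoff: first prefix whose running sum reaches the budget
--     if t <= 0:
--         cut, leftover = 0, 0
--     else:
--         s = 0
--         cut = None
--         for i, e in enumerate(lst):
--             s += e
--             if s >= t:
--                 cut, leftover = i + 1, s - t
--                 break
--         if cut is None:
--             return []
--     res = [leftover] if leftover > 0 else []
--     res.extend(e for e in lst[cut:] if e > 0)
--     return res
--
--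
-- def solve(edges, time_J, time_C):
--     edges['j'] = _consume(edges['j'], time_J)
--     edges['c'] = _consume(edges['c'], time_C)
--     return len(edges['cj']) + 2 * len(edges['c']) + 2 * len(edges['j'])
-- ===== Notes on version B (the rewrite author's own statement) =====
-- stated objective: alternative
-- what changed: A's per-edge budget-decrement loop is replaced by a prefix-sum scan that locates the first cutoff index where the running total reaches the budget, then reconstructs the kept list from the boundary edge's leftover plus the remaining positive edges.
import Mathlib
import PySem

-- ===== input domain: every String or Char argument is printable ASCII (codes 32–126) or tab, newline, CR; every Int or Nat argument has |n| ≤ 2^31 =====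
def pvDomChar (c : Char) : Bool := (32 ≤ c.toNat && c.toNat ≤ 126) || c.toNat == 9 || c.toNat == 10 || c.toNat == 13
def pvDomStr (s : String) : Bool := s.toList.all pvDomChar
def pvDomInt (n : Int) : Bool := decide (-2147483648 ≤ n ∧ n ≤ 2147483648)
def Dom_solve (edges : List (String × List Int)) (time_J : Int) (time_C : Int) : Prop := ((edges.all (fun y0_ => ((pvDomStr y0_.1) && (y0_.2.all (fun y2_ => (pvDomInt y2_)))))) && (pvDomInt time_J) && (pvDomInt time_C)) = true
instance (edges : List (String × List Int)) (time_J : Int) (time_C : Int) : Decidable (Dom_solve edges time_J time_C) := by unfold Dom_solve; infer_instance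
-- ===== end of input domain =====

-- B replaces A's per-edge budget-decrement loop by a prefix-sum cutoff search plus list
-- reconstruction (objective: alternative decomposition). A also mutates edges['j']/edges['c']
-- in place; B performs the same mutation, but the equivalence proved here is about the
-- RETURN value only.

-- ===== PORT A =====
-- A's for-loop over one edge list: state = (remaining budget, accumulated kept edges)
def solveLoop : List Int → Int → List Int → Int × List Int
  | [], t, acc => (t, acc)
  | e :: rest, t, acc =>
    let (t', e') := if t > 0 then (t - min t e, e - min t e) else (t, e)
    solveLoop rest t' (if e' > 0 then acc ++ [e'] else acc)

def solve (edges : List (String × List Int)) (time_J : Int) (time_C : Int) : Int :=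
  let edgesJ := (solveLoop ((edges.lookup "j").getD []) time_J []).2
  let edgesC := (solveLoop ((edges.lookup "c").getD []) time_C []).2
  (((edges.lookup "cj").getD []).length : Int) + 2 * (edgesC.length : Int) + 2 * (edgesJ.length : Int)

-- ===== PORT B =====
-- Source B's cutoff scan: running sum s, index i; some (cut, leftover) at the first prefix reaching t
def consumeScan : List Int → Int → Int → Nat → Option (Nat × Int)
  | [], _, _, _ => none
  | e :: rest, t, s, i =>
    let s' := s + e
    if s' ≥ t then some (i + 1, s' - t) else consumeScan rest t s' (i + 1)

-- Source B's _consume: leftover of the boundary edge (if > 0) ++ remaining positive edges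
def consume (lst : List Int) (t : Int) : List Int :=
  match (if t ≤ 0 then some (0, 0) else consumeScan lst t 0 0) with
  | none => []
  | some (cut, leftover) =>
    (if leftover > 0 then [leftover] else []) ++ (lst.drop cut).filter (fun e => e > 0)

def solve_alt (edges : List (String × List Int)) (time_J : Int) (time_C : Int) : Int :=
  let j := consume ((edges.lookup "j").getD []) time_J
  let c := consume ((edges.lookup "c").getD []) time_C
  (((edges.lookup "cj").getD []).length : Int) + 2 * (c.length : Int) + 2 * (j.length : Int)

-- ===== PRECONDITION & SPEC =====
-- Pre_ excludes only inputs where A raises KeyError: a key 'j', 'c' or 'cj' missing from edges.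
def Pre_solve (edges : List (String × List Int)) (time_J : Int) (time_C : Int) : Prop :=
  (edges.lookup "j").isSome = true ∧ (edges.lookup "c").isSome = true ∧ (edges.lookup "cj").isSome = true
instance (edges : List (String × List Int)) (time_J : Int) (time_C : Int) : Decidable (Pre_solve edges time_J time_C) := by unfold Pre_solve; infer_instance
def pvWitness_solve : (List (String × List Int)) × Int × Int :=
  ([("j", [3, 1, 4]), ("c", [2, 2]), ("cj", [5])], 4, 1)

def Spec_solve (edges : List (String × List Int)) (time_J : Int) (time_C : Int) (out : Int) : Prop := out = solve_alt edges time_J time_C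
instance (edges : List (String × List Int)) (time_J : Int) (time_C : Int) (out : Int) : Decidable (Spec_solve edges time_J time_C out) := by unfold Spec_solve; infer_instance

-- ===== CLAIM (what is proved, stated in full; the proofs are below) =====
def Claim_equal_solve : Prop := ∀ (edges : List (String × List Int)) (time_J : Int) (time_C : Int), Dom_solve edges time_J time_C → Pre_solve edges time_J time_C → Spec_solve edges time_J time_C (solve edges time_J time_C)

-- ===== LEMMAS AND PROOFS =====

-- With a non-positive budget A's loop just filters the positive edges.
lemma solveLoop_nonpos (lst : List Int) (t : Int) (acc : List Int) (ht : ¬ t > 0) :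
    (solveLoop lst t acc).2 = acc ++ lst.filter (fun e => e > 0) := by
  induction lst generalizing acc with
  | nil => simp [solveLoop]
  | cons e rest ih =>
    simp only [solveLoop, if_neg ht, List.filter_cons]
    by_cases he : e > 0
    · simp [he, ih, List.append_assoc]
    · simp [he, ih]

-- The scan is invariant under shifting the running sum into the budget and the index offset.
lemma consumeScan_shift (lst : List Int) (t s : Int) (i : Nat) :
    consumeScan lst t s i = (consumeScan lst (t - s) 0 0).map (fun p => (p.1 + i, p.2)) := by
  induction lst generalizing t s i with
  | nil => simp [consumeScan]
  | cons e rest ih =>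
    simp only [consumeScan]
    by_cases h : s + e ≥ t
    · rw [if_pos h, if_pos (by omega : (0 : Int) + e ≥ t - s)]
      simp only [Option.map_some, Option.some.injEq, Prod.mk.injEq]
      omega
    · rw [if_neg h, if_neg (by omega : ¬ ((0 : Int) + e ≥ t - s))]
      rw [ih, ih (t - s) (0 + e) 1]
      have : t - (s + e) = t - s - (0 + e) := by ring
      rw [this]
      cases consumeScan rest (t - s - (0 + e)) 0 0 with
      | none => rfl
      | some p =>
        simp only [Option.map_some, Option.some.injEq, Prod.mk.injEq]
        exact ⟨by omega, trivial⟩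

lemma consume_nonpos (lst : List Int) (t : Int) (ht : ¬ t > 0) :
    consume lst t = lst.filter (fun e => e > 0) := by
  simp [consume, if_pos (by omega : t ≤ 0)]

-- Main loop invariant: A's loop result is the accumulator followed by B's consume.
lemma solveLoop_eq_consume (lst : List Int) (t : Int) (acc : List Int) :
    (solveLoop lst t acc).2 = acc ++ consume lst t := by
  induction lst generalizing t acc with
  | nil =>
    by_cases h : t ≤ 0 <;> simp [solveLoop, consume, consumeScan, h]
  | cons e rest ih =>
    by_cases ht : t > 0
    · simp only [solveLoop, if_pos ht]
      by_cases he : e ≥ t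
      · -- boundary edge: budget exhausted here, leftover e - t
        have hmin : min t e = t := by omega
        rw [hmin]
        have h0 : ¬ (t - t > 0) := by omega
        rw [solveLoop_nonpos _ _ _ h0]
        have hc : consume (e :: rest) t
            = (if e - t > 0 then [e - t] else []) ++ rest.filter (fun x => x > 0) := by
          simp only [consume, if_neg (by omega : ¬ t ≤ 0), consumeScan,
            if_pos (by omega : (0 : Int) + e ≥ t)]
          norm_num
        rw [hc]
        by_cases hl : e - t > 0
        · rw [if_pos (show (0:Int) < e - t by omega), if_pos (show (0:Int) < e - t by omega)]
          simp [List.append_assoc]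
        · rw [if_neg (show ¬ (0:Int) < e - t by omega), if_neg (show ¬ (0:Int) < e - t by omega)]
          simp
      · -- edge fully consumed: recurse with budget t - e
        have hmin : min t e = e := by omega
        rw [hmin]
        have he0 : ¬ (e - e > 0) := by omega
        rw [if_neg he0, ih]
        have hc : consume (e :: rest) t = consume rest (t - e) := by
          simp only [consume, if_neg (by omega : ¬ t ≤ 0), consumeScan,
            if_neg (by omega : ¬ ((0 : Int) + e ≥ t))]
          rw [consumeScan_shift rest t (0 + e) 1]
          have : t - (0 + e) = t - e := by ring
          rw [this, if_neg (by omega : ¬ t - e ≤ 0)]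
          cases consumeScan rest (t - e) 0 0 with
          | none => rfl
          | some p => simp [List.drop_succ_cons]
        rw [hc]
    · rw [solveLoop_nonpos _ _ _ ht, consume_nonpos _ _ ht]

-- ===== VERDICT (by name: the statement is the Claim_ definition above) =====
theorem solve_spec : Claim_equal_solve := by
  intro edges tJ tC _ _
  unfold Spec_solve solve solve_alt
  rw [solveLoop_eq_consume, solveLoop_eq_consume]
  simp
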